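-- pv_equiv track=rewrite | github.com/Aasthaengg/IBMdataset | Python_codes/p03017/s293339417.py | check_reachable
-- ===== SOURCE A (Python) =====
-- def check_reachable(N, S, start):
--     reachable = [False for s in S]
--     reachable[start] = True
--
--     def _bfs(x):
--         for d in [1, 2]:
--             nx = x + d
--             if 0 <= nx < N and not reachable[nx] and S[nx] == ".":
--                 reachable[nx] = True
--                 _bfs(nx)
--
--     _bfs(start)
--     return reachable
-- ===== SOURCE B (Python) =====
-- def check_reachable(N, S, start):
--     reachable = [False] * len(S)
--     reachable[start] = True
--     p1, p2 = True, False  # reachability of cells i-1 and i-2 while scanning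
--     for i in range(start + 1, N):
--         cur = S[i] == "." and (p1 or p2)
--         if cur:
--             reachable[i] = True
--         p1, p2 = cur, p1
--     return reachable
-- ===== Notes on version B (the rewrite author's own statement) =====
-- stated objective: simpler
-- what changed: Replaces the recursive DFS over a shared mutable array by a single forward scan computing the +1/+2 jump recurrence with two rolling booleans (no recursion, no array reads).
-- outside the precondition, e.g. on check_reachable(3, '...', -3): A returns [True, False, False], B returns [True, True, True]; on check_reachable(7, '#####', 0): A returns [True, False, False, False, False], B raises IndexError
import Mathlib
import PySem

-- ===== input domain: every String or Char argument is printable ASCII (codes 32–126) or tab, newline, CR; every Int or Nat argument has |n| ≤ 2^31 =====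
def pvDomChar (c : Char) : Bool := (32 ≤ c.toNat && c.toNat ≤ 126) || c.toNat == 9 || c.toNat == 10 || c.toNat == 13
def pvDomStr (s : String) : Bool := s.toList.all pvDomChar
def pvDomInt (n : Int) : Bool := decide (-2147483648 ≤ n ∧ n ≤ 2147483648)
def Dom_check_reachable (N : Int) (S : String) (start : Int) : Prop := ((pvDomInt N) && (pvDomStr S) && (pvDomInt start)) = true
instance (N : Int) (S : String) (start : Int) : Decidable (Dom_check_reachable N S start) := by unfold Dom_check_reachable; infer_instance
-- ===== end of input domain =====

-- B replaces A's recursive DFS over a shared array by a single forward scan of the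
-- +1/+2 jump recurrence with two rolling booleans; objective: simpler.


-- ===== PORT A =====
-- the inner recursive `_bfs`: `for d in [1, 2]` unrolled, the mutable `reachable` threaded
def bfsA (N : Int) (L : List Char) (x : Int) (reach : List Bool) : List Bool :=
  let r1 :=
    if h1 : 0 ≤ x + 1 ∧ x + 1 < N ∧ PySem.List.pyGetD reach (x + 1) false = false ∧
            PySem.List.pyGetD L (x + 1) ' ' = '.' then
      bfsA N L (x + 1) (PySem.List.pySetD reach (x + 1) true)
    else reach
  if h2 : 0 ≤ x + 2 ∧ x + 2 < N ∧ PySem.List.pyGetD r1 (x + 2) false = false ∧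
          PySem.List.pyGetD L (x + 2) ' ' = '.' then
    bfsA N L (x + 2) (PySem.List.pySetD r1 (x + 2) true)
  else r1
termination_by (N - x).toNat
decreasing_by
  · omega
  · omega

def check_reachable (N : Int) (S : String) (start : Int) : List Bool :=
  let L := S.toList
  let reach0 := L.map (fun _ => false)                 -- [False for s in S]
  let reach := PySem.List.pySetD reach0 start true     -- reachable[start] = True (in range under Pre_)
  bfsA N L start reach

-- ===== PORT B =====
-- one step of B's forward scan: the state is (reachable, p1, p2)
def stepB (L : List Char) (st : List Bool × Bool × Bool) (i : Int) : List Bool × Bool × Bool :=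
  let cur := decide (PySem.List.pyGetD L i ' ' = '.') && (st.2.1 || st.2.2)
  ((if cur then PySem.List.pySetD st.1 i true else st.1), cur, st.2.1)

def check_reachable_alt (N : Int) (S : String) (start : Int) : List Bool :=
  let L := S.toList
  let reach := PySem.List.pySetD (List.replicate L.length false) start true
  ((PySem.List.pyRange (start + 1) N 1).foldl (stepB L) (reach, true, false)).1

-- ===== PRECONDITION & SPEC =====
-- Pre_ admits an in-range start index with either N ≤ len(S), or N ≤ start+1 (then the search
-- never moves and both programs return the freshly initialised array, for any in-range start).
-- Excluded while A still returns: (a) negative `start` with N > start+1 — A's Python wraps the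
-- preset cell but still jumps from the raw negative index, an accidental hybrid no caller would
-- rely on; (b) N > len(S) with N > start+1 — there A indexes past the end of `reachable`/`S` and
-- raises IndexError as soon as the explored region comes within 2 cells of len(S), so whether it
-- returns at all is an accident of where the walls in S lie (B raises there once its scan reaches len(S)).
def Pre_check_reachable (N : Int) (S : String) (start : Int) : Prop :=
  -(S.toList.length : Int) ≤ start ∧ start < (S.toList.length : Int) ∧
    (N ≤ start + 1 ∨ (0 ≤ start ∧ N ≤ (S.toList.length : Int)))
instance (N : Int) (S : String) (start : Int) : Decidable (Pre_check_reachable N S start) := by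
  unfold Pre_check_reachable; infer_instance

def pvWitness_check_reachable : Int × String × Int := (5, "..#..", 1)

def Spec_check_reachable (N : Int) (S : String) (start : Int) (out : List Bool) : Prop := out = check_reachable_alt N S start
instance (N : Int) (S : String) (start : Int) (out : List Bool) : Decidable (Spec_check_reachable N S start out) := by unfold Spec_check_reachable; infer_instance

-- ===== CLAIM (what is proved, stated in full; the proofs are below) =====
def Claim_equal_check_reachable : Prop := ∀ (N : Int) (S : String) (start : Int), Dom_check_reachable N S start → Pre_check_reachable N S start → Spec_check_reachable N S start (check_reachable N S start)

-- ===== LEMMAS AND PROOFS =====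

def chainF (N : Int) (L : List Char) (start i : Int) : Bool :=
  if h : start < i then
    decide (0 ≤ i) && decide (i < N) && decide (PySem.List.pyGetD L i ' ' = '.') &&
      (decide (i - 1 = start) || chainF N L start (i - 1) ||
       decide (i - 2 = start) || chainF N L start (i - 2))
  else false
termination_by (i - start).toNat
decreasing_by
  · omega
  · omega

lemma chainF_gt {N : Int} {L : List Char} {start i : Int} (h : chainF N L start i = true) :
    start < i := by
  rw [chainF] at h
  by_cases hi : start < i
  · exact hi
  · simp [hi] at h

lemma chainF_unfold {N : Int} {L : List Char} {start i : Int} (h : start < i) :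
    chainF N L start i =
      (decide (0 ≤ i) && decide (i < N) && decide (PySem.List.pyGetD L i ' ' = '.') &&
        (decide (i - 1 = start) || chainF N L start (i - 1) ||
         decide (i - 2 = start) || chainF N L start (i - 2))) := by
  rw [chainF]; simp [h]

lemma chainF_bounds {N : Int} {L : List Char} {start i : Int} (h : chainF N L start i = true) :
    0 ≤ i ∧ i < N ∧ PySem.List.pyGetD L i ' ' = '.' := by
  have hg := chainF_gt h
  rw [chainF_unfold hg] at h
  simp at h
  exact ⟨h.1.1.1, h.1.1.2, h.1.2⟩

lemma chainF_intro {N : Int} {L : List Char} {start i : Int} (hgt : start < i) (h0 : 0 ≤ i)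
    (hiN : i < N) (hdot : PySem.List.pyGetD L i ' ' = '.')
    (hpred : i - 1 = start ∨ chainF N L start (i - 1) = true ∨ i - 2 = start ∨
      chainF N L start (i - 2) = true) :
    chainF N L start i = true := by
  rw [chainF_unfold hgt]
  simp [h0, hiN, hdot]
  tauto

lemma chainF_elim {N : Int} {L : List Char} {start i : Int} (h : chainF N L start i = true) :
    i - 1 = start ∨ chainF N L start (i - 1) = true ∨ i - 2 = start ∨
      chainF N L start (i - 2) = true := by
  rw [chainF_unfold (chainF_gt h)] at h
  simp at h
  tauto

lemma get_pySetD (r : List Bool) (i y : Int) (hi : 0 ≤ i) (hil : i < (r.length : Int))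
    (hy : 0 ≤ y) :
    PySem.List.pyGetD (PySem.List.pySetD r i true) y false =
      if y = i then true else PySem.List.pyGetD r y false := by
  rw [PySem.List.pySetD_of_nonneg r true hi]
  by_cases hyl : y < (r.length : Int)
  · rw [PySem.List.pyGetD_eq_getElem _ _ hy (by simpa using hyl),
        PySem.List.pyGetD_eq_getElem _ _ hy hyl]
    rw [List.getElem_set]
    split_ifs with a1 a2 a2 <;> first | rfl | omega
  · have hyc : y = ((y.toNat : ℕ) : ℤ) := (Int.toNat_of_nonneg hy).symm
    rw [hyc, PySem.List.pyGetD_natCast, PySem.List.pyGetD_natCast]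
    rw [List.getD_eq_default _ _ (by simp; omega), List.getD_eq_default _ _ (by omega)]
    rw [if_neg (by omega)]

lemma len_pySetD (r : List Bool) (i : Int) (hi : 0 ≤ i) (v : Bool) :
    (PySem.List.pySetD r i v).length = r.length := by
  rw [PySem.List.pySetD_of_nonneg r v hi]; simp

def GoodRun (N : Int) (L : List Char) (start x : Int) (reach r' : List Bool) : Prop :=
  r'.length = reach.length ∧
  (∀ y : Int, 0 ≤ y → PySem.List.pyGetD reach y false = true →
     PySem.List.pyGetD r' y false = true) ∧
  (∀ y : Int, 0 ≤ y → PySem.List.pyGetD r' y false = true →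
     PySem.List.pyGetD reach y false = true ∨ chainF N L start y = true) ∧
  (∀ d : Int, (d = 1 ∨ d = 2) → 0 ≤ x + d → x + d < N →
     PySem.List.pyGetD L (x + d) ' ' = '.' → PySem.List.pyGetD r' (x + d) false = true) ∧
  (∀ y : Int, 0 ≤ y → PySem.List.pyGetD r' y false = true →
     PySem.List.pyGetD reach y false = false →
     ∀ d : Int, (d = 1 ∨ d = 2) → y + d < N →
       PySem.List.pyGetD L (y + d) ' ' = '.' → PySem.List.pyGetD r' (y + d) false = true)

lemma bfsA_main (N : Int) (L : List Char) (start : Int) (hs : 0 ≤ start)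
    (hN : N ≤ (L.length : Int)) :
    ∀ (k : ℕ) (x : Int) (reach : List Bool), (N - x).toNat ≤ k →
      reach.length = L.length → (x = start ∨ chainF N L start x = true) →
      GoodRun N L start x reach (bfsA N L x reach) := by
  intro k
  induction k using Nat.strong_induction_on with
  | _ k IH =>
  intro x reach hk hlen hx
  have hxgt : start ≤ x := by
    rcases hx with h | h
    · omega
    · exact le_of_lt (chainF_gt h)
  rw [bfsA]
  by_cases h1 : 0 ≤ x + 1 ∧ x + 1 < N ∧ PySem.List.pyGetD reach (x + 1) false = false ∧
      PySem.List.pyGetD L (x + 1) ' ' = '.'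
  · simp only [dif_pos h1]
    -- the +1 jump is taken
    have hc1 : chainF N L start (x + 1) = true := by
      refine chainF_intro (by omega) h1.1 h1.2.1 h1.2.2.2 ?_
      rcases hx with h | h
      · exact Or.inl (by omega)
      · exact Or.inr (Or.inl (by simpa using h))
    have hl1 : x + 1 < (reach.length : Int) := by omega
    have hlen1 : (PySem.List.pySetD reach (x + 1) true).length = L.length := by
      rw [len_pySetD _ _ h1.1]; exact hlen
    have g1 : ∀ y : Int, 0 ≤ y →
        PySem.List.pyGetD (PySem.List.pySetD reach (x + 1) true) y false =
          if y = x + 1 then true else PySem.List.pyGetD reach y false :=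
      fun y hy => get_pySetD reach (x + 1) y h1.1 hl1 hy
    have S1 := IH (N - (x + 1)).toNat (by omega) (x + 1) (PySem.List.pySetD reach (x + 1) true)
      (le_refl _) hlen1 (Or.inr hc1)
    obtain ⟨len1, mono1, sound1, succ1, clos1⟩ := S1
    set r1 := bfsA N L (x + 1) (PySem.List.pySetD reach (x + 1) true) with hr1
    have hlenr1 : r1.length = L.length := by rw [len1]; exact hlen1
    by_cases h2 : 0 ≤ x + 2 ∧ x + 2 < N ∧ PySem.List.pyGetD r1 (x + 2) false = false ∧
        PySem.List.pyGetD L (x + 2) ' ' = '.'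
    · simp only [dif_pos h2]
      have hc2 : chainF N L start (x + 2) = true := by
        refine chainF_intro (by omega) h2.1 h2.2.1 h2.2.2.2 ?_
        rcases hx with h | h
        · exact Or.inr (Or.inr (Or.inl (by omega)))
        · exact Or.inr (Or.inr (Or.inr (by simpa using h)))
      have hl2 : x + 2 < (r1.length : Int) := by omega
      have hlen2 : (PySem.List.pySetD r1 (x + 2) true).length = L.length := by
        rw [len_pySetD _ _ h2.1]; exact hlenr1
      have g2 : ∀ y : Int, 0 ≤ y →
          PySem.List.pyGetD (PySem.List.pySetD r1 (x + 2) true) y false =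
            if y = x + 2 then true else PySem.List.pyGetD r1 y false :=
        fun y hy => get_pySetD r1 (x + 2) y h2.1 hl2 hy
      have S2 := IH (N - (x + 2)).toNat (by omega) (x + 2) (PySem.List.pySetD r1 (x + 2) true)
        (le_refl _) hlen2 (Or.inr hc2)
      obtain ⟨len2, mono2, sound2, succ2, clos2⟩ := S2
      set r2 := bfsA N L (x + 2) (PySem.List.pySetD r1 (x + 2) true) with hr2
      -- lifting from r1 to r2
      have lift12 : ∀ y : Int, 0 ≤ y → PySem.List.pyGetD r1 y false = true →
          PySem.List.pyGetD r2 y false = true := by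
        intro y hy h
        apply mono2 y hy
        rw [g2 y hy]
        split_ifs <;> simp [h]
      refine ⟨?_, ?_, ?_, ?_, ?_⟩
      · rw [len2, hlen2, hlen]
      · -- mono
        intro y hy h
        apply lift12 y hy
        apply mono1 y hy
        rw [g1 y hy]; split_ifs <;> simp [h]
      · -- sound
        intro y hy h
        rcases sound2 y hy h with h' | hc
        · rw [g2 y hy] at h'
          by_cases hyx : y = x + 2
          · exact Or.inr (hyx ▸ hc2)
          · rw [if_neg hyx] at h'
            rcases sound1 y hy h' with h'' | hc
            · rw [g1 y hy] at h''
              by_cases hyx1 : y = x + 1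
              · exact Or.inr (hyx1 ▸ hc1)
              · rw [if_neg hyx1] at h''
                exact Or.inl h''
            · exact Or.inr hc
        · exact Or.inr hc
      · -- succ at x
        intro d hd h0 hdN hdot
        rcases hd with rfl | rfl
        · apply lift12 _ h0
          apply mono1 _ h0
          rw [g1 _ h0, if_pos rfl]
        · apply mono2 _ h0
          rw [g2 _ h0, if_pos rfl]
      · -- closure for newly marked cells
        intro y hy hyr2 hyreach d hd hdN hdot
        have hlift : PySem.List.pyGetD r1 (y + d) false = true →
            PySem.List.pyGetD r2 (y + d) false = true := lift12 _ (by omega)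
        by_cases hy1 : PySem.List.pyGetD r1 y false = true
        · -- y present already in r1
          by_cases hys1 : PySem.List.pyGetD (PySem.List.pySetD reach (x + 1) true) y false = true
          · -- then y = x + 1 (it is not in reach)
            have hyx1 : y = x + 1 := by
              rw [g1 y hy] at hys1
              by_contra hne
              rw [if_neg hne] at hys1
              rw [hys1] at hyreach
              exact absurd hyreach (by simp)
            subst hyx1
            exact hlift (succ1 d hd (by omega) hdN hdot)
          · exact hlift (clos1 y hy hy1 (by simpa using hys1) d hd hdN hdot)
        · -- y appeared in the second branch
          by_cases hys2 : PySem.List.pyGetD (PySem.List.pySetD r1 (x + 2) true) y false = true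
          · have hyx2 : y = x + 2 := by
              rw [g2 y hy] at hys2
              by_contra hne
              rw [if_neg hne] at hys2
              exact hy1 hys2
            subst hyx2
            exact succ2 d hd (by omega) hdN hdot
          · exact clos2 y hy hyr2 (by simpa using hys2) d hd hdN hdot
    · -- +2 jump not taken
      simp only [dif_neg h2]
      refine ⟨?_, ?_, ?_, ?_, ?_⟩
      · rw [len1, hlen1, hlen]
      · intro y hy h
        apply mono1 y hy
        rw [g1 y hy]; split_ifs <;> simp [h]
      · intro y hy h
        rcases sound1 y hy h with h' | hc
        · rw [g1 y hy] at h'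
          by_cases hyx1 : y = x + 1
          · exact Or.inr (hyx1 ▸ hc1)
          · rw [if_neg hyx1] at h'
            exact Or.inl h'
        · exact Or.inr hc
      · intro d hd h0 hdN hdot
        rcases hd with rfl | rfl
        · apply mono1 _ h0
          rw [g1 _ h0, if_pos rfl]
        · -- the +2 guard failed although in range and open: cell already marked in r1
          by_contra hc
          exact h2 ⟨h0, hdN, by simpa using hc, hdot⟩
      · intro y hy hyr1 hyreach d hd hdN hdot
        by_cases hys1 : PySem.List.pyGetD (PySem.List.pySetD reach (x + 1) true) y false = true
        · have hyx1 : y = x + 1 := by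
            rw [g1 y hy] at hys1
            by_contra hne
            rw [if_neg hne] at hys1
            rw [hys1] at hyreach
            exact absurd hyreach (by simp)
          subst hyx1
          exact succ1 d hd (by omega) hdN hdot
        · exact clos1 y hy hyr1 (by simpa using hys1) d hd hdN hdot
  · -- +1 jump not taken
    simp only [dif_neg h1]
    by_cases h2 : 0 ≤ x + 2 ∧ x + 2 < N ∧ PySem.List.pyGetD reach (x + 2) false = false ∧
        PySem.List.pyGetD L (x + 2) ' ' = '.'
    · simp only [dif_pos h2]
      have hc2 : chainF N L start (x + 2) = true := by
        refine chainF_intro (by omega) h2.1 h2.2.1 h2.2.2.2 ?_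
        rcases hx with h | h
        · exact Or.inr (Or.inr (Or.inl (by omega)))
        · exact Or.inr (Or.inr (Or.inr (by simpa using h)))
      have hl2 : x + 2 < (reach.length : Int) := by omega
      have hlen2 : (PySem.List.pySetD reach (x + 2) true).length = L.length := by
        rw [len_pySetD _ _ h2.1]; exact hlen
      have g2 : ∀ y : Int, 0 ≤ y →
          PySem.List.pyGetD (PySem.List.pySetD reach (x + 2) true) y false =
            if y = x + 2 then true else PySem.List.pyGetD reach y false :=
        fun y hy => get_pySetD reach (x + 2) y h2.1 hl2 hy
      have S2 := IH (N - (x + 2)).toNat (by omega) (x + 2) (PySem.List.pySetD reach (x + 2) true)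
        (le_refl _) hlen2 (Or.inr hc2)
      obtain ⟨len2, mono2, sound2, succ2, clos2⟩ := S2
      set r2 := bfsA N L (x + 2) (PySem.List.pySetD reach (x + 2) true) with hr2
      refine ⟨?_, ?_, ?_, ?_, ?_⟩
      · rw [len2, hlen2, hlen]
      · intro y hy h
        apply mono2 y hy
        rw [g2 y hy]; split_ifs <;> simp [h]
      · intro y hy h
        rcases sound2 y hy h with h' | hc
        · rw [g2 y hy] at h'
          by_cases hyx : y = x + 2
          · exact Or.inr (hyx ▸ hc2)
          · rw [if_neg hyx] at h'
            exact Or.inl h'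
        · exact Or.inr hc
      · intro d hd h0 hdN hdot
        rcases hd with rfl | rfl
        · -- +1 guard failed although in range and open: already marked in reach
          have hm : PySem.List.pyGetD reach (x + 1) false = true := by
            by_contra hc
            exact h1 ⟨h0, hdN, by simpa using hc, hdot⟩
          apply mono2 _ h0
          rw [g2 _ h0]; split_ifs <;> simp [hm]
        · apply mono2 _ h0
          rw [g2 _ h0, if_pos rfl]
      · intro y hy hyr2 hyreach d hd hdN hdot
        by_cases hys2 : PySem.List.pyGetD (PySem.List.pySetD reach (x + 2) true) y false = true
        · have hyx2 : y = x + 2 := by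
            rw [g2 y hy] at hys2
            by_contra hne
            rw [if_neg hne] at hys2
            rw [hys2] at hyreach
            exact absurd hyreach (by simp)
          subst hyx2
          exact succ2 d hd (by omega) hdN hdot
        · exact clos2 y hy hyr2 (by simpa using hys2) d hd hdN hdot
    · simp only [dif_neg h2]
      refine ⟨rfl, fun y hy h => h, fun y hy h => Or.inl h, ?_, ?_⟩
      · intro d hd h0 hdN hdot
        rcases hd with rfl | rfl
        · by_contra hc
          exact h1 ⟨h0, hdN, by simpa using hc, hdot⟩
        · by_contra hc
          exact h2 ⟨h0, hdN, by simpa using hc, hdot⟩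
      · intro y hy hyr hyreach d hd hdN hdot
        rw [hyr] at hyreach
        exact absurd hyreach (by simp)

lemma get_false (n : ℕ) (y : Int) (hy : 0 ≤ y) :
    PySem.List.pyGetD (List.replicate n false) y false = false := by
  by_cases hyl : y < (n : Int)
  · rw [PySem.List.pyGetD_eq_getElem _ _ hy (by simpa using hyl)]
    simp
  · have hyc : y = ((y.toNat : ℕ) : ℤ) := (Int.toNat_of_nonneg hy).symm
    rw [hyc, PySem.List.pyGetD_natCast, List.getD_eq_default _ _ (by simp; omega)]

lemma get_base (n : ℕ) (start : Int) (hs : 0 ≤ start) (hn : start < (n : Int)) (y : Int)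
    (hy : 0 ≤ y) :
    PySem.List.pyGetD (PySem.List.pySetD (List.replicate n false) start true) y false =
      decide (y = start) := by
  rw [get_pySetD _ _ _ hs (by simpa using hn) hy]
  by_cases h : y = start
  · simp [h]
  · simp [h, get_false n y hy]

lemma A_char (N : Int) (L : List Char) (start : Int) (hs : 0 ≤ start)
    (hsl : start < (L.length : Int)) (hN : N ≤ (L.length : Int)) :
    ∀ y : Int, 0 ≤ y →
      PySem.List.pyGetD
          (bfsA N L start (PySem.List.pySetD (List.replicate L.length false) start true)) y false =
        (decide (y = start) || chainF N L start y) := by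
  have hlenb : (PySem.List.pySetD (List.replicate L.length false) start true).length = L.length := by
    rw [len_pySetD _ _ hs]; simp
  have G := bfsA_main N L start hs hN (N - start).toNat start
    (PySem.List.pySetD (List.replicate L.length false) start true) (le_refl _) hlenb (Or.inl rfl)
  obtain ⟨lenF, monoF, soundF, succF, closF⟩ := G
  set fin := bfsA N L start (PySem.List.pySetD (List.replicate L.length false) start true) with hfin
  have hbase : ∀ y : Int, 0 ≤ y →
      PySem.List.pyGetD (PySem.List.pySetD (List.replicate L.length false) start true) y false =
        decide (y = start) := fun y hy => get_base L.length start hs hsl y hy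
  -- completeness: every chain cell is marked
  have compl : ∀ (k : ℕ) (i : Int), (i - start).toNat ≤ k → chainF N L start i = true →
      PySem.List.pyGetD fin i false = true := by
    intro k
    induction k using Nat.strong_induction_on with
    | _ k IH =>
    intro i hk hc
    obtain ⟨h0, hiN, hdot⟩ := chainF_bounds hc
    have hgt := chainF_gt hc
    rcases chainF_elim hc with hp | hp | hp | hp
    · have e : start + 1 = i := by omega
      have := succF 1 (Or.inl rfl) (by omega) (by omega) (by rw [e]; exact hdot)
      rw [e] at this; exact this
    · have hgt1 := chainF_gt hp
      obtain ⟨h01, _, _⟩ := chainF_bounds hp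
      have hm1 := IH (i - 1 - start).toNat (by omega) (i - 1) (le_refl _) hp
      have hb1 : PySem.List.pyGetD (PySem.List.pySetD (List.replicate L.length false) start true)
          (i - 1) false = false := by
        rw [hbase _ h01]; simp; omega
      have e : i - 1 + 1 = i := by omega
      have := closF (i - 1) h01 hm1 hb1 1 (Or.inl rfl) (by omega) (by rw [e]; exact hdot)
      rw [e] at this; exact this
    · have e : start + 2 = i := by omega
      have := succF 2 (Or.inr rfl) (by omega) (by omega) (by rw [e]; exact hdot)
      rw [e] at this; exact this
    · have hgt2 := chainF_gt hp
      obtain ⟨h02, _, _⟩ := chainF_bounds hp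
      have hm2 := IH (i - 2 - start).toNat (by omega) (i - 2) (le_refl _) hp
      have hb2 : PySem.List.pyGetD (PySem.List.pySetD (List.replicate L.length false) start true)
          (i - 2) false = false := by
        rw [hbase _ h02]; simp; omega
      have e : i - 2 + 2 = i := by omega
      have := closF (i - 2) h02 hm2 hb2 2 (Or.inr rfl) (by omega) (by rw [e]; exact hdot)
      rw [e] at this; exact this
  intro y hy
  have hiff : PySem.List.pyGetD fin y false = true ↔ (y = start ∨ chainF N L start y = true) := by
    constructor
    · intro h
      rcases soundF y hy h with h' | hc
      · rw [hbase y hy] at h'; simp at h'; exact Or.inl h'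
      · exact Or.inr hc
    · intro h
      rcases h with rfl | hc
      · apply monoF y hy
        rw [hbase y hy]; simp
      · exact compl (y - start).toNat y (le_refl _) hc
  rw [Bool.eq_iff_iff]
  simp only [Bool.or_eq_true, decide_eq_true_eq]
  exact hiff


lemma foldB_main (N : Int) (L : List Char) (start : Int) (hs : 0 ≤ start)
    (hN : N ≤ (L.length : Int)) :
    ∀ (k : ℕ) (a : Int) (r : List Bool) (p1 p2 : Bool), (N - a).toNat ≤ k →
      start + 1 ≤ a → r.length = L.length →
      p1 = (decide (a - 1 = start) || chainF N L start (a - 1)) →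
      p2 = (decide (a - 2 = start) || chainF N L start (a - 2)) →
      (∀ y : Int, 0 ≤ y → PySem.List.pyGetD r y false =
         (decide (y = start) || (chainF N L start y && decide (y < a)))) →
      ((PySem.List.pyRange a N 1).foldl (stepB L) (r, p1, p2)).1.length = L.length ∧
      ∀ y : Int, 0 ≤ y →
        PySem.List.pyGetD ((PySem.List.pyRange a N 1).foldl (stepB L) (r, p1, p2)).1 y false =
          (decide (y = start) || chainF N L start y) := by
  intro k
  induction k using Nat.strong_induction_on with
  | _ k IH =>
  intro a r p1 p2 hk ha hlen hp1 hp2 hr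
  by_cases haN : a < N
  · rw [PySem.List.pyRange_one_cons haN, List.foldl_cons]
    -- the step at index a computes exactly chainF a
    have h0a : 0 ≤ a := by omega
    have hcur : (decide (PySem.List.pyGetD L a ' ' = '.') && (p1 || p2)) = chainF N L start a := by
      rw [chainF_unfold (by omega)]
      rw [hp1, hp2]
      by_cases hdot : PySem.List.pyGetD L a ' ' = '.'
      · simp [hdot, h0a, haN]
        cases h1 : chainF N L start (a - 1) <;> cases h2 : chainF N L start (a - 2) <;>
          by_cases e1 : a - 1 = start <;> by_cases e2 : a - 2 = start <;> simp [e1, e2]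
      · simp [hdot]
    have hstep : stepB L (r, p1, p2) a =
        ((if chainF N L start a then PySem.List.pySetD r a true else r),
          chainF N L start a, p1) := by
      simp only [stepB, hcur]
    rw [hstep]
    have hlen' : (if chainF N L start a then PySem.List.pySetD r a true else r).length =
        L.length := by
      split_ifs
      · rw [len_pySetD _ _ h0a]; exact hlen
      · exact hlen
    refine IH (N - (a + 1)).toNat (by omega) (a + 1) _ _ _ (le_refl _) (by omega) hlen' ?_ ?_ ?_
    · have e : a + 1 - 1 = a := by omega
      rw [e]
      simp [show ¬(a = start) by omega]
    · have e : a + 1 - 2 = a - 1 := by omega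
      rw [e, hp1]
    · intro y hy
      have hdec : (decide (y < a) : Bool) = decide (y < a + 1) ∨ y = a := by
        by_cases hya : y = a
        · exact Or.inr hya
        · exact Or.inl (decide_eq_decide.mpr (by omega))
      split_ifs with hca
      · rw [get_pySetD r a y h0a (by omega) hy]
        by_cases hya : y = a
        · subst hya
          simp [hca, show ¬(y = start) by omega, show y < y + 1 by omega]
        · rw [if_neg hya, hr y hy]
          rcases hdec with hde | hde
          · rw [hde]
          · exact absurd hde hya
      · rw [hr y hy]
        have hcf : chainF N L start a = false := by simpa using hca
        by_cases hya : y = a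
        · subst hya
          simp [hcf]
        · rcases hdec with hde | hde
          · rw [hde]
          · exact absurd hde hya
  · rw [PySem.List.pyRange_one_eq_nil (by omega), List.foldl_nil]
    refine ⟨hlen, ?_⟩
    intro y hy
    rw [hr y hy]
    cases hcy : chainF N L start y
    · simp
    · have hlt : y < a := by
        have := (chainF_bounds hcy).2.1
        omega
      simp [hlt]

-- ===== VERDICT (by name: the statement is the Claim_ definition above) =====
theorem check_reachable_spec : Claim_equal_check_reachable := by
  intro N S start hdom hpre
  obtain ⟨hlo, hsl, hdisj⟩ := hpre
  unfold Spec_check_reachable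
  simp only [check_reachable, check_reachable_alt]
  rw [List.map_const']
  rcases hdisj with hle | ⟨hs, hN⟩
  · -- N ≤ start + 1: the search never moves in either program
    rw [PySem.List.pyRange_one_eq_nil (by omega), List.foldl_nil]
    rw [bfsA]
    have h1 : ¬(0 ≤ start + 1 ∧ start + 1 < N ∧
        PySem.List.pyGetD (PySem.List.pySetD (List.replicate S.toList.length false) start true)
          (start + 1) false = false ∧
        PySem.List.pyGetD S.toList (start + 1) ' ' = '.') := by
      rintro ⟨_, h, _, _⟩; omega
    simp only [dif_neg h1]
    have h2 : ¬(0 ≤ start + 2 ∧ start + 2 < N ∧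
        PySem.List.pyGetD (PySem.List.pySetD (List.replicate S.toList.length false) start true)
          (start + 2) false = false ∧
        PySem.List.pyGetD S.toList (start + 2) ' ' = '.') := by
      rintro ⟨_, h, _, _⟩; omega
    simp only [dif_neg h2]
  · have hlenb : (PySem.List.pySetD (List.replicate S.toList.length false) start true).length =
        S.toList.length := by
      rw [len_pySetD _ _ hs]; simp
    have G := bfsA_main N S.toList start hs hN (N - start).toNat start
      (PySem.List.pySetD (List.replicate S.toList.length false) start true)
      (le_refl _) hlenb (Or.inl rfl)
    have hA := A_char N S.toList start hs hsl hN
    have hcm1 : chainF N S.toList start (start - 1) = false := by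
      rw [chainF]; simp [show ¬(start < start - 1) by omega]
    have hB := foldB_main N S.toList start hs hN (N - (start + 1)).toNat (start + 1)
      (PySem.List.pySetD (List.replicate S.toList.length false) start true) true false
      (le_refl _) (le_refl _) hlenb
      (by simp [show start + 1 - 1 = start by omega])
      (by simp [show start + 1 - 2 = start - 1 by omega, hcm1, show ¬(start - 1 = start) by omega])
      (by
        intro y hy
        rw [get_base S.toList.length start hs (by simpa using hsl) y hy]
        cases hcy : chainF N S.toList start y
        · simp
        · have := chainF_gt hcy
          simp [show ¬(y < start + 1) by omega])
    refine List.ext_getElem ?_ ?_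
    · rw [G.1, hlenb, hB.1]
    · intro j hj1 hj2
      have hj : (j : Int) < (S.toList.length : Int) := by
        rw [G.1, hlenb] at hj1
        exact_mod_cast hj1
      have e1 : PySem.List.pyGetD
          (bfsA N S.toList start
            (PySem.List.pySetD (List.replicate S.toList.length false) start true)) (j : Int) false =
          (bfsA N S.toList start
            (PySem.List.pySetD (List.replicate S.toList.length false) start true))[j] := by
        rw [PySem.List.pyGetD_eq_getElem _ _ (by omega) (by rw [G.1, hlenb]; exact_mod_cast hj)]
        simp
      have e2 : PySem.List.pyGetD
          ((PySem.List.pyRange (start + 1) N 1).foldl (stepB S.toList)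
            (PySem.List.pySetD (List.replicate S.toList.length false) start true, true, false)).1
            (j : Int) false =
          ((PySem.List.pyRange (start + 1) N 1).foldl (stepB S.toList)
            (PySem.List.pySetD (List.replicate S.toList.length false) start true, true, false)).1[j] := by
        rw [PySem.List.pyGetD_eq_getElem _ _ (by omega) (by rw [hB.1]; exact_mod_cast hj)]
        simp
      rw [← e1, ← e2, hA (j : Int) (by omega), hB.2 (j : Int) (by omega)]
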